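-- pv_equiv track=rewrite | github.com/Rogfel/JubartData | jubartETL/utils.py | get_mark
-- ===== SOURCE A (Python) =====
-- def get_mark(product, marks):
--     list_values = [s for s in marks if s in product]
--     result = None
--     result_len = 0
--     for val in list_values:
--         if len(val) > result_len:
--             result_len = len(val)
--             result = val
--     return result
-- ===== SOURCE B (Python) =====
-- def get_mark(product, marks):
--     for s in sorted(marks, key=len, reverse=True):
--         if s and s in product:
--             return s
--     return None
-- ===== Notes on version B (the rewrite author's own statement) =====
-- stated objective: faster
-- what changed: Replaces the filter-then-running-max scan by a stable descending sort by length followed by an early-exit scan returning the first nonempty mark occurring in product; A runs a substring test on every mark, B stops at the first (longest) hit.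
import Mathlib
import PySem

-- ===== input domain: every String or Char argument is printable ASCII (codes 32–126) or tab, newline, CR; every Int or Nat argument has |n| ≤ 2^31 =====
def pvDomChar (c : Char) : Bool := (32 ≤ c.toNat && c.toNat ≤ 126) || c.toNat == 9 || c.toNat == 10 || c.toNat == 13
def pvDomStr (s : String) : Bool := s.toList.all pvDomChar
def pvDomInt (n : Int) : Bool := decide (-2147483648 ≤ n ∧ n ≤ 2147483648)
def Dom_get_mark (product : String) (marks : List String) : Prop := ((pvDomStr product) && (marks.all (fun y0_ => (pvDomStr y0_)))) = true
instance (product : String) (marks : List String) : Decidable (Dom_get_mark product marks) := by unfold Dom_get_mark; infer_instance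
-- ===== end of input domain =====

-- B replaces A's filter-then-running-max scan by a stable descending sort by length
-- followed by an early-exit scan returning the first nonempty mark occurring in product (alternative decomposition).

-- ===== PORT A =====
def get_mark (product : String) (marks : List String) : Option String :=
  let list_values := marks.filter (fun s => PySem.Str.isIn s product)
  (list_values.foldl
    (fun (st : Option String × Int) val =>
      if PySem.Str.len val > st.2 then (some val, PySem.Str.len val) else st)
    (none, 0)).1

-- ===== PORT B =====
def get_mark_alt (product : String) (marks : List String) : Option String :=
  (PySem.List.sorted marks (fun s => PySem.Str.len s) true).find?
    (fun s => !(s == "") && PySem.Str.isIn s product)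

-- ===== PRECONDITION & SPEC =====
def Spec_get_mark (product : String) (marks : List String) (out : Option String) : Prop :=
  out = get_mark_alt product marks
instance (product : String) (marks : List String) (out : Option String) : Decidable (Spec_get_mark product marks out) := by
  unfold Spec_get_mark; infer_instance

-- ===== CLAIM (what is proved, stated in full; the proofs are below) =====
def Claim_equal_get_mark : Prop := ∀ (product : String) (marks : List String), Dom_get_mark product marks → Spec_get_mark product marks (get_mark product marks)

-- ===== LEMMAS AND PROOFS =====

-- the insertion step of PySem's stable descending insertion sort with key = len
def pvIns (acc : List String) (x : String) : List String :=
  PySem.List.insertBy (fun a b => decide (PySem.Str.len b < PySem.Str.len a)) x acc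

-- the head of the accumulator evolves as a first-strict-max fold
def pvStep (o : Option String) (v : String) : Option String :=
  match o with
  | none => some v
  | some b => if PySem.Str.len b < PySem.Str.len v then some v else some b

-- A's loop step
def pvAStep (st : Option String × Int) (val : String) : Option String × Int :=
  if PySem.Str.len val > st.2 then (some val, PySem.Str.len val) else st

theorem pvGetMarkA_eq (product : String) (marks : List String) :
    get_mark product marks
      = ((marks.filter (fun s => PySem.Str.isIn s product)).foldl pvAStep (none, 0)).1 := rfl

theorem pvIns_nil (x : String) : pvIns [] x = [x] := rfl

theorem pvIns_cons_pos (x y : String) (t : List String)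
    (h : PySem.Str.len y < PySem.Str.len x) : pvIns (y :: t) x = x :: y :: t := by
  unfold pvIns
  rw [PySem.List.insertBy, if_pos (decide_eq_true h)]

theorem pvIns_cons_neg (x y : String) (t : List String)
    (h : ¬ PySem.Str.len y < PySem.Str.len x) : pvIns (y :: t) x = y :: pvIns t x := by
  unfold pvIns
  rw [PySem.List.insertBy, if_neg (by simpa using h)]

theorem pvHead_ins (acc : List String) (x : String) :
    (pvIns acc x).head? = pvStep acc.head? x := by
  cases acc with
  | nil => rfl
  | cons y t =>
      by_cases hxy : PySem.Str.len y < PySem.Str.len x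
      · rw [pvIns_cons_pos x y t hxy]
        show some x = if PySem.Str.len y < PySem.Str.len x then some x else some y
        rw [if_pos hxy]
      · rw [pvIns_cons_neg x y t hxy]
        show some y = if PySem.Str.len y < PySem.Str.len x then some x else some y
        rw [if_neg hxy]

theorem pvHead_foldl (l : List String) (acc : List String) :
    (l.foldl pvIns acc).head? = l.foldl pvStep acc.head? := by
  induction l generalizing acc with
  | nil => rfl
  | cons x t ih => simp only [List.foldl_cons, ih, pvHead_ins]

theorem pvSorted_head (l : List String) :
    (PySem.List.sorted l (fun s => PySem.Str.len s) true).head? = l.foldl pvStep none := by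
  rw [PySem.List.sorted_rev_eq_foldl_insertBy]
  exact pvHead_foldl l []

-- ins puts x in front when it is strictly longer than everything present
theorem pvIns_front (zs : List String) (x : String)
    (h : ∀ z ∈ zs, PySem.Str.len z < PySem.Str.len x) : pvIns zs x = x :: zs := by
  cases zs with
  | nil => rfl
  | cons z t => exact pvIns_cons_pos x z t (h z (by simp))

theorem pvPairwise_ins (acc : List String) (x : String)
    (h : acc.Pairwise (fun a b => PySem.Str.len b ≤ PySem.Str.len a)) :
    (pvIns acc x).Pairwise (fun a b => PySem.Str.len b ≤ PySem.Str.len a) := by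
  induction acc with
  | nil => simp [pvIns_nil]
  | cons y t ih =>
      rw [List.pairwise_cons] at h
      by_cases hxy : PySem.Str.len y < PySem.Str.len x
      · rw [pvIns_cons_pos x y t hxy]
        refine List.Pairwise.cons ?_ (List.Pairwise.cons h.1 h.2)
        intro z hz
        rcases List.mem_cons.1 hz with rfl | hz
        · exact le_of_lt hxy
        · exact le_trans (h.1 z hz) (le_of_lt hxy)
      · rw [pvIns_cons_neg x y t hxy]
        refine List.Pairwise.cons ?_ (ih h.2)
        intro z hz
        rcases (PySem.List.mem_insertBy _ x z t).1 hz with rfl | hz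
        · exact not_lt.1 hxy
        · exact h.1 z hz

theorem pvFilter_ins (q : String → Bool) (acc : List String) (x : String)
    (h : acc.Pairwise (fun a b => PySem.Str.len b ≤ PySem.Str.len a)) :
    (pvIns acc x).filter q = if q x then pvIns (acc.filter q) x else acc.filter q := by
  induction acc with
  | nil =>
      cases hq : q x <;> simp [pvIns_nil, List.filter, hq]
  | cons y t ih =>
      rw [List.pairwise_cons] at h
      have ihx := ih h.2
      by_cases hxy : PySem.Str.len y < PySem.Str.len x
      · rw [pvIns_cons_pos x y t hxy]
        cases hq : q x with
        | false => simp [List.filter_cons, hq]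
        | true =>
            rw [if_pos rfl, List.filter_cons_of_pos hq, pvIns_front]
            intro z hz
            rcases List.mem_cons.1 (List.mem_of_mem_filter hz) with rfl | hzt
            · exact hxy
            · exact lt_of_le_of_lt (h.1 z hzt) hxy
      · rw [pvIns_cons_neg x y t hxy]
        cases hy : q y with
        | false =>
            rw [List.filter_cons_of_neg (by simp [hy]),
                List.filter_cons_of_neg (by simp [hy]), ihx]
        | true =>
            rw [List.filter_cons_of_pos hy, List.filter_cons_of_pos hy, ihx]
            cases hq : q x with
            | false => simp
            | true =>
                rw [if_pos rfl, if_pos rfl, pvIns_cons_neg x y _ hxy]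

theorem pvFilter_foldl (q : String → Bool) (l : List String) (acc : List String)
    (h : acc.Pairwise (fun a b => PySem.Str.len b ≤ PySem.Str.len a)) :
    (l.foldl pvIns acc).filter q = (l.filter q).foldl pvIns (acc.filter q) := by
  induction l generalizing acc with
  | nil => rfl
  | cons x t ih =>
      rw [List.foldl_cons, ih (pvIns acc x) (pvPairwise_ins acc x h),
          pvFilter_ins q acc x h, List.filter_cons]
      cases hq : q x with
      | false => rw [if_neg (by simp), if_neg (by simp)]
      | true => rw [if_pos rfl, if_pos (by simp), List.foldl_cons]

theorem pvFilter_sorted (q : String → Bool) (l : List String) :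
    (PySem.List.sorted l (fun s => PySem.Str.len s) true).filter q
      = PySem.List.sorted (l.filter q) (fun s => PySem.Str.len s) true := by
  rw [PySem.List.sorted_rev_eq_foldl_insertBy, PySem.List.sorted_rev_eq_foldl_insertBy]
  exact pvFilter_foldl q l [] List.Pairwise.nil

theorem pvFind_eq_head_filter (q : String → Bool) (l : List String) :
    l.find? q = (l.filter q).head? := by
  induction l with
  | nil => rfl
  | cons x t ih =>
      rw [List.find?_cons, List.filter_cons]
      cases hq : q x with
      | false => simpa using ih
      | true => simp

theorem pvB_eq (product : String) (marks : List String) :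
    get_mark_alt product marks
      = (marks.filter (fun s => !(s == "") && PySem.Str.isIn s product)).foldl pvStep none := by
  rw [get_mark_alt, pvFind_eq_head_filter, pvFilter_sorted, pvSorted_head]

theorem pvLen_empty : PySem.Str.len "" = 0 := by simp [PySem.Str.len_eq]

theorem pvLen_pos (x : String) (h : x ≠ "") : 0 < PySem.Str.len x := by
  rw [PySem.Str.len_eq]
  have hnil : x.toList ≠ [] := by simpa using h
  have : 0 < x.toList.length := List.length_pos_iff.2 hnil
  exact_mod_cast this

theorem pvG1 (t : List String) (r : String) (h : 0 < PySem.Str.len r) :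
    (t.foldl pvAStep (some r, PySem.Str.len r)).1
      = (t.filter (fun s => !(s == ""))).foldl pvStep (some r) := by
  induction t generalizing r with
  | nil => rfl
  | cons v t ih =>
      by_cases hv : v = ""
      · subst hv
        rw [List.filter_cons_of_neg (by simp), List.foldl_cons]
        show ((t.foldl pvAStep (if PySem.Str.len "" > PySem.Str.len r then _ else (some r, PySem.Str.len r)))).1 = _
        rw [if_neg (by rw [pvLen_empty]; omega)]
        exact ih r h
      · have hp := pvLen_pos v hv
        rw [List.filter_cons_of_pos (by simp [hv]), List.foldl_cons, List.foldl_cons]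
        show (t.foldl pvAStep (if PySem.Str.len v > PySem.Str.len r then (some v, PySem.Str.len v) else (some r, PySem.Str.len r))).1
          = (t.filter (fun s => !(s == ""))).foldl pvStep
              (if PySem.Str.len r < PySem.Str.len v then some v else some r)
        by_cases hrv : PySem.Str.len r < PySem.Str.len v
        · rw [if_pos hrv, if_pos hrv]
          exact ih v hp
        · rw [if_neg hrv, if_neg hrv]
          exact ih r h

theorem pvG2 (L : List String) :
    (L.foldl pvAStep (none, 0)).1 = (L.filter (fun s => !(s == ""))).foldl pvStep none := by
  induction L with
  | nil => rfl
  | cons x t ih =>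
      by_cases hx : x = ""
      · subst hx
        rw [List.filter_cons_of_neg (by simp), List.foldl_cons]
        show (t.foldl pvAStep (if PySem.Str.len "" > (0 : Int) then _ else (none, 0))).1 = _
        rw [if_neg (by rw [pvLen_empty]; omega)]
        exact ih
      · have hp := pvLen_pos x hx
        rw [List.filter_cons_of_pos (by simp [hx]), List.foldl_cons, List.foldl_cons]
        show (t.foldl pvAStep (if PySem.Str.len x > (0 : Int) then (some x, PySem.Str.len x) else (none, 0))).1
          = (t.filter (fun s => !(s == ""))).foldl pvStep (some x)
        rw [if_pos hp]
        exact pvG1 t x hp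

-- ===== VERDICT (by name: the statement is the Claim_ definition above) =====
theorem get_mark_spec : Claim_equal_get_mark := by
  intro product marks _
  unfold Spec_get_mark
  rw [pvGetMarkA_eq, pvB_eq, pvG2]
  congr 1
  rw [List.filter_filter]
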